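-- pv_equiv track=rewrite | github.com/tylanmm/comp_prog | codeforces/solved/similar_pairs.py | solve
-- ===== SOURCE A (Python) =====
-- def solve(nums):
--     parity = [[], []]
--     for n in nums:
--         parity[n%2].append(n)
--     if len(parity[0]) % 2 == 0:
--         return 'YES'
--
--     for n in parity[0]:
--         if n+1 in parity[1] or n-1 in parity[1]:
--             return 'YES'
--     return 'NO'
-- ===== SOURCE B (Python) =====
-- def solve(nums):
--     if sum(1 for n in nums if n % 2 == 0) % 2 == 0:
--         return 'YES'
--     s = sorted(nums)
--     for a, b in zip(s, s[1:]):
--         if b - a == 1: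
--             return 'YES'
--     return 'NO'
-- ===== Notes on version B (the rewrite author's own statement) =====
-- stated objective: alternative
-- what changed: Replaces A's parity bucketing plus per-even membership scans in the odds list with an even-count check and a single sort-then-adjacent-pair scan for two values differing by exactly 1.
import Mathlib
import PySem

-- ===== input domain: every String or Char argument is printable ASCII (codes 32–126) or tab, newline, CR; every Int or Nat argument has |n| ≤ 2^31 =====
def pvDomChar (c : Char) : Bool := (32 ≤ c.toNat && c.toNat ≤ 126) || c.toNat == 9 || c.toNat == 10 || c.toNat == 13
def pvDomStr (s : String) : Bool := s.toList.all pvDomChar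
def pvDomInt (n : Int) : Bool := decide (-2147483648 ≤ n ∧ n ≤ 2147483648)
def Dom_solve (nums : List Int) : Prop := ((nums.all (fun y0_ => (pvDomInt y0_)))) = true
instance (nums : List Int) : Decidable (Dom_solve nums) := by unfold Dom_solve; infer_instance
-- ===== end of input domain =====

-- B replaces A's parity bucketing + per-even membership scans with an even-count
-- check and a sort-then-adjacent-pair scan (alternative decomposition).

-- ===== PORT A =====
-- A's second loop: for n in parity[0]: if n+1 in parity[1] or n-1 in parity[1]: return 'YES'
def solveLoop (evens odds : List Int) : String :=
  match evens with
  | [] => "NO"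
  | e :: rest => if odds.contains (e + 1) || odds.contains (e - 1) then "YES" else solveLoop rest odds

def solve (nums : List Int) : String :=
  let parity := nums.foldl
    (fun (p : List Int × List Int) n =>
      if PySem.Int.mod n 2 = 0 then (p.1 ++ [n], p.2) else (p.1, p.2 ++ [n]))
    ([], [])
  if parity.1.length % 2 = 0 then "YES" else solveLoop parity.1 parity.2

-- ===== PORT B =====
-- B's adjacent-pair scan over the sorted list (for a, b in zip(s, s[1:]))
def hasAdj : List Int → Bool
  | a :: b :: t => if b - a = 1 then true else hasAdj (b :: t)
  | _ => false

def solve_alt (nums : List Int) : String :=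
  if (nums.countP (fun n => decide (PySem.Int.mod n 2 = 0))) % 2 = 0 then "YES"
  else if hasAdj (PySem.List.sorted nums (fun x => x) false) then "YES" else "NO"

-- ===== PRECONDITION & SPEC =====
def Spec_solve (nums : List Int) (out : String) : Prop := out = solve_alt nums
instance (nums : List Int) (out : String) : Decidable (Spec_solve nums out) := by unfold Spec_solve; infer_instance

-- ===== CLAIM (what is proved, stated in full; the proofs are below) =====
def Claim_equal_solve : Prop := ∀ (nums : List Int), Dom_solve nums → Spec_solve nums (solve nums)

-- ===== LEMMAS AND PROOFS =====

lemma parity_fold (nums : List Int) (a b : List Int) :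
    nums.foldl
      (fun (p : List Int × List Int) n =>
        if PySem.Int.mod n 2 = 0 then (p.1 ++ [n], p.2) else (p.1, p.2 ++ [n]))
      (a, b)
    = (a ++ nums.filter (fun n => decide (PySem.Int.mod n 2 = 0)),
       b ++ nums.filter (fun n => decide (¬ PySem.Int.mod n 2 = 0))) := by
  induction nums generalizing a b with
  | nil => simp
  | cons n t ih =>
    rw [List.foldl_cons]
    by_cases h : PySem.Int.mod n 2 = 0
    · rw [if_pos h, ih,
        List.filter_cons_of_pos (p := fun m => decide (PySem.Int.mod m 2 = 0)) (decide_eq_true h),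
        List.filter_cons_of_neg (p := fun m => decide (¬ PySem.Int.mod m 2 = 0))
          (fun hc => (of_decide_eq_true hc) h)]
      simp [List.append_assoc]
    · rw [if_neg h, ih,
        List.filter_cons_of_neg (p := fun m => decide (PySem.Int.mod m 2 = 0))
          (fun hc => h (of_decide_eq_true hc)),
        List.filter_cons_of_pos (p := fun m => decide (¬ PySem.Int.mod m 2 = 0)) (decide_eq_true h)]
      simp [List.append_assoc]

lemma solveLoop_eq (evens odds : List Int) :
    solveLoop evens odds =
      if evens.any (fun e => odds.contains (e + 1) || odds.contains (e - 1)) then "YES" else "NO" := by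
  induction evens with
  | nil => simp [solveLoop]
  | cons e rest ih =>
    simp only [solveLoop, List.any_cons, ih]
    by_cases h : (odds.contains (e + 1) || odds.contains (e - 1)) = true
    · rw [if_pos h, if_pos (by rw [h, Bool.true_or])]
    · simp only [Bool.not_eq_true] at h
      simp only [h, Bool.false_or, Bool.false_eq_true, if_false]

lemma hasAdj_cons (a : Int) (t : List Int) (h : hasAdj t = true) : hasAdj (a :: t) = true := by
  cases t with
  | nil => simp [hasAdj] at h
  | cons b t' =>
    by_cases hd : b - a = 1 <;> simp [hasAdj, hd, h]

lemma exists_pair_of_hasAdj : ∀ s : List Int, hasAdj s = true → ∃ x, x ∈ s ∧ x + 1 ∈ s := by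
  intro s
  induction s with
  | nil => simp [hasAdj]
  | cons a t ih =>
    cases t with
    | nil => simp [hasAdj]
    | cons b t' =>
      intro h
      by_cases hd : b - a = 1
      · exact ⟨a, by simp, by simp [show a + 1 = b by omega]⟩
      · simp only [hasAdj, if_neg hd] at h
        obtain ⟨x, hx, hx1⟩ := ih h
        exact ⟨x, List.mem_cons_of_mem _ hx, List.mem_cons_of_mem _ hx1⟩

lemma hasAdj_of_succ_mem (t : List Int) : ∀ (a : Int),
    (∀ y ∈ t, a ≤ y) → t.Pairwise (· ≤ ·) → a + 1 ∈ t → hasAdj (a :: t) = true := by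
  induction t with
  | nil => intro a _ _ h; simp at h
  | cons b t' ih =>
    intro a hle hp hmem
    by_cases hd : b - a = 1
    · simp [hasAdj, hd]
    · have hab : a ≤ b := hle b (by simp)
      have hmem' : a + 1 ∈ t' := by
        rcases List.mem_cons.mp hmem with h | h
        · omega
        · exact h
      have hb1 : b ≤ a + 1 := (List.pairwise_cons.mp hp).1 _ hmem'
      have hba : b = a := by omega
      have : hasAdj (b :: t') = true := by
        refine ih b (List.pairwise_cons.mp hp).1 (List.pairwise_cons.mp hp).2 ?_
        rw [hba]; exact hmem'
      simp [hasAdj, hd, this]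

lemma hasAdj_of_pair : ∀ s : List Int, s.Pairwise (· ≤ ·) →
    ∀ x : Int, x ∈ s → x + 1 ∈ s → hasAdj s = true := by
  intro s
  induction s with
  | nil => intro _ x hx; simp at hx
  | cons a t ih =>
    intro hp x hx hx1
    have hle := (List.pairwise_cons.mp hp).1
    have hpt := (List.pairwise_cons.mp hp).2
    rcases List.mem_cons.mp hx with rfl | hxt
    · have : x + 1 ∈ t := by
        rcases List.mem_cons.mp hx1 with h | h
        · omega
        · exact h
      exact hasAdj_of_succ_mem t x hle hpt this
    · rcases List.mem_cons.mp hx1 with h | hx1t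
      · have := hle x hxt; omega
      · exact hasAdj_cons a t (ih hpt x hxt hx1t)

-- the two loop conditions agree: some even has an odd neighbour ↔ some value has its successor present
lemma any_eq_hasAdj (nums : List Int) :
    ((nums.filter (fun n => decide (PySem.Int.mod n 2 = 0))).any
      (fun e => (nums.filter (fun n => decide (¬ PySem.Int.mod n 2 = 0))).contains (e + 1)
        || (nums.filter (fun n => decide (¬ PySem.Int.mod n 2 = 0))).contains (e - 1)))
    = hasAdj (PySem.List.sorted nums (fun x => x) false) := by
  have hmod : ∀ n : Int, PySem.Int.mod n 2 = n % 2 := fun n =>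
    PySem.Int.mod_eq_emod_of_pos (by norm_num)
  have hpair : (∃ x : Int, x ∈ nums ∧ x + 1 ∈ nums) ↔
      hasAdj (PySem.List.sorted nums (fun x => x) false) = true := by
    constructor
    · rintro ⟨x, hx, hx1⟩
      exact hasAdj_of_pair _ (PySem.List.sorted_pairwise nums (fun x => x))
        x ((PySem.List.mem_sorted nums (fun x => x) false x).mpr hx) ((PySem.List.mem_sorted nums (fun x => x) false (x+1)).mpr hx1)
    · intro h
      obtain ⟨x, hx, hx1⟩ := exists_pair_of_hasAdj _ h
      exact ⟨x, (PySem.List.mem_sorted nums (fun x => x) false x).mp hx, (PySem.List.mem_sorted nums (fun x => x) false (x+1)).mp hx1⟩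
  rw [Bool.eq_iff_iff]
  simp only [List.any_eq_true, List.mem_filter, List.contains_iff_mem, Bool.or_eq_true,
    decide_eq_true_eq, hmod]
  rw [← hpair]
  constructor
  · rintro ⟨e, ⟨he, hev⟩, h | h⟩
    · exact ⟨e, he, h.1⟩
    · exact ⟨e - 1, h.1, by rw [sub_add_cancel]; exact he⟩
  · rintro ⟨x, hx, hx1⟩
    by_cases hev : x % 2 = 0
    · exact ⟨x, ⟨hx, hev⟩, Or.inl ⟨hx1, by omega⟩⟩
    · refine ⟨x + 1, ⟨hx1, by omega⟩, Or.inr ⟨by simpa using hx, by omega⟩⟩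

-- ===== VERDICT (by name: the statement is the Claim_ definition above) =====
theorem solve_spec : Claim_equal_solve := by
  intro nums _
  unfold Spec_solve
  show solve nums = solve_alt nums
  unfold solve solve_alt
  rw [parity_fold]
  simp only [List.nil_append, List.countP_eq_length_filter]
  by_cases h : (nums.filter (fun n => decide (PySem.Int.mod n 2 = 0))).length % 2 = 0
  · rw [if_pos h, if_pos h]
  · rw [if_neg h, if_neg h, solveLoop_eq, any_eq_hasAdj]
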